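-- pv_equiv track=rewrite | github.com/zenqiaz/Agent_workflow_practice | orca_toolset.py | extract_nbo_section
-- ===== SOURCE A (Python) =====
-- def extract_nbo_section(output_text: str) -> str:
--     """Best-effort extract of NBO/NPA-related part of the output."""
--     lines = output_text.splitlines()
--     keep = []
--     in_section = False
--
--     markers_start = (
--         "NATURAL POPULATION ANALYSIS",
--         "NATURAL POPULATIONS",
--         "NATURAL BOND ORBITALS",
--         "NBO ANALYSIS",
--     )
--     markers_end = (
--         "MULLIKEN POPULATION ANALYSIS",
--         "LOEWDIN POPULATION ANALYSIS",
--         "ORBITAL POPULATIONS",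
--         "Total charge on system",
--     )
--
--     for line in lines:
--         if any(m in line for m in markers_start):
--             in_section = True
--
--         if in_section:
--             keep.append(line)
--
--         if in_section and any(m in line for m in markers_end):
--             break
--
--     if not keep:
--         # fallback: last chunk
--         keep = lines[-200:]
--
--     return "\n".join(keep)
-- ===== SOURCE B (Python) =====
-- def extract_nbo_section(output_text: str) -> str:
--     """Best-effort extract of NBO/NPA-related part of the output."""
--     lines = output_text.splitlines()
--
--     markers_start = (
--         "NATURAL POPULATION ANALYSIS",
--         "NATURAL POPULATIONS",
--         "NATURAL BOND ORBITALS",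
--         "NBO ANALYSIS",
--     )
--     markers_end = (
--         "MULLIKEN POPULATION ANALYSIS",
--         "LOEWDIN POPULATION ANALYSIS",
--         "ORBITAL POPULATIONS",
--         "Total charge on system",
--     )
--
--     start = next((i for i, l in enumerate(lines)
--                   if any(m in l for m in markers_start)), None)
--     if start is None:
--         # fallback: last chunk
--         return "\n".join(lines[-200:])
--     end = next((j for j in range(start, len(lines))
--                 if any(m in lines[j] for m in markers_end)), len(lines) - 1)
--     return "\n".join(lines[start:end + 1])
-- ===== Notes on version B (the rewrite author's own statement) =====
-- stated objective: simpler
-- what changed: Replaces A's stateful in_section-flag loop with break and fallback-on-empty-keep by two searches for boundary indices (first start-marker line, then first end-marker line from there) and a single slice join.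
import Mathlib
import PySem

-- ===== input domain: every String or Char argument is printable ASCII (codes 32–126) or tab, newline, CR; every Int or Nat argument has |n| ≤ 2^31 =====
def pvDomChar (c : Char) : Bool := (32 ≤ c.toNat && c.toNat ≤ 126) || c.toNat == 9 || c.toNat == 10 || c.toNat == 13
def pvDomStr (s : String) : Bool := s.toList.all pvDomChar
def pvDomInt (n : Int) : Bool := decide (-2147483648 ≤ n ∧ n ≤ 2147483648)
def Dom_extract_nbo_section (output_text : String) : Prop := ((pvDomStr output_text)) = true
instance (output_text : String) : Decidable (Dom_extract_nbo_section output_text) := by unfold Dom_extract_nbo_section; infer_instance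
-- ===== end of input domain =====

-- B replaces A's in_section flag loop by two index searches (start marker, then end marker
-- from start onward) and one slice — simpler decomposition, same O(n·m) cost.

-- ===== PORT A =====
def nboMarkersStart : List String :=
  ["NATURAL POPULATION ANALYSIS", "NATURAL POPULATIONS",
   "NATURAL BOND ORBITALS", "NBO ANALYSIS"]

def nboMarkersEnd : List String :=
  ["MULLIKEN POPULATION ANALYSIS", "LOEWDIN POPULATION ANALYSIS",
   "ORBITAL POPULATIONS", "Total charge on system"]

def nboHasStart (l : String) : Bool := nboMarkersStart.any (fun m => PySem.Str.isIn m l)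
def nboHasEnd (l : String) : Bool := nboMarkersEnd.any (fun m => PySem.Str.isIn m l)

-- A's for-loop: state is the in_section flag; the break returns the kept lines so far,
-- so the recursion returns the suffix of kept lines (cons-built, same lines in order).
def nboLoopA : List String → Bool → List String
  | [], _ => []
  | l :: rest, ins =>
    let ins' := if nboHasStart l then true else ins
    if ins' then
      if nboHasEnd l then [l] else l :: nboLoopA rest ins'
    else nboLoopA rest ins'

def extract_nbo_section (output_text : String) : String :=
  let lines := PySem.Str.splitlines output_text
  let keep := nboLoopA lines false
  let keep := if keep = [] then PySem.List.slice lines (some (-200)) none else keep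
  PySem.Str.join "\n" keep

-- ===== PORT B =====
def extract_nbo_section_alt (output_text : String) : String :=
  let lines := PySem.Str.splitlines output_text
  match lines.findIdx? nboHasStart with
  | none => PySem.Str.join "\n" (PySem.List.slice lines (some (-200)) none)
  | some s =>
    let e : Nat :=
      match (lines.drop s).findIdx? nboHasEnd with
      | some k => s + k
      | none => lines.length - 1
    PySem.Str.join "\n" (PySem.List.slice lines (some (s : Int)) (some ((e : Int) + 1)))

-- ===== PRECONDITION & SPEC =====
def Spec_extract_nbo_section (output_text : String) (out : String) : Prop := out = extract_nbo_section_alt output_text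
instance (output_text : String) (out : String) : Decidable (Spec_extract_nbo_section output_text out) := by unfold Spec_extract_nbo_section; infer_instance

-- ===== CLAIM (what is proved, stated in full; the proofs are below) =====
def Claim_equal_extract_nbo_section : Prop := ∀ (output_text : String), Dom_extract_nbo_section output_text → Spec_extract_nbo_section output_text (extract_nbo_section output_text)

-- ===== LEMMAS AND PROOFS =====

-- The segment A keeps once in_section is set: everything up to and including the first
-- end-marker line, or the whole remainder if there is none.
def nboSeg (t : List String) : List String :=
  match t.findIdx? nboHasEnd with
  | some k => t.take (k + 1)
  | none => t

theorem nboLoopA_true (t : List String) : nboLoopA t true = nboSeg t := by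
  induction t with
  | nil => rfl
  | cons l rest ih =>
    have hstep : nboLoopA (l :: rest) true =
        if nboHasEnd l then [l] else l :: nboLoopA rest true := by
      simp [nboLoopA]
    rw [hstep]
    simp only [nboSeg, List.findIdx?_cons]
    by_cases he : nboHasEnd l
    · simp [he]
    · rw [if_neg he, ih]
      simp only [he, Bool.false_eq_true, ite_false, nboSeg]
      cases h : rest.findIdx? nboHasEnd with
      | none => simp
      | some k => simp [List.take_succ_cons]

theorem nboLoopA_false (ls : List String) :
    nboLoopA ls false =
      match ls.findIdx? nboHasStart with
      | none => []
      | some s => nboSeg (ls.drop s) := by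
  induction ls with
  | nil => rfl
  | cons l rest ih =>
    simp only [List.findIdx?_cons]
    by_cases hs : nboHasStart l
    · have : nboLoopA (l :: rest) false = nboLoopA (l :: rest) true := by
        simp [nboLoopA, hs]
      rw [this, nboLoopA_true]
      simp [hs]
    · have : nboLoopA (l :: rest) false = nboLoopA rest false := by
        simp [nboLoopA, hs]
      rw [this, ih]
      simp only [hs, Bool.false_eq_true, ite_false]
      cases h : rest.findIdx? nboHasStart with
      | none => simp
      | some s => simp

theorem nboSeg_ne_nil (t : List String) (ht : t ≠ []) : nboSeg t ≠ [] := by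
  cases t with
  | nil => exact absurd rfl ht
  | cons l rest =>
    simp only [nboSeg, List.findIdx?_cons]
    by_cases he : nboHasEnd l
    · simp [he]
    · simp only [he, Bool.false_eq_true, ite_false]
      cases h : rest.findIdx? nboHasEnd <;> simp

theorem extract_nbo_section_spec : Claim_equal_extract_nbo_section := by
  intro output_text _
  unfold Spec_extract_nbo_section extract_nbo_section extract_nbo_section_alt
  simp only []
  set lines := PySem.Str.splitlines output_text with hlines
  rw [nboLoopA_false]
  cases hf : lines.findIdx? nboHasStart with
  | none => simp
  | some s =>
    have hslt : s < lines.length := (List.findIdx?_eq_some_iff_findIdx_eq.mp hf).1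
    have hdrop : lines.drop s ≠ [] := by
      intro h
      have := List.drop_eq_nil_iff.mp h
      omega
    have hne := nboSeg_ne_nil _ hdrop
    simp only [hne, ite_false]
    congr 1
    cases hk : (lines.drop s).findIdx? nboHasEnd with
    | some k =>
      have hklt : k < (lines.drop s).length := (List.findIdx?_eq_some_iff_findIdx_eq.mp hk).1
      simp only [nboSeg, hk]
      have hcast : ((s + k : Nat) : Int) + 1 = (s : Int) + ((k + 1 : Nat) : Int) := by
        push_cast; ring
      rw [hcast, PySem.List.slice_natCast_add]
    | none =>
      simp only [nboSeg, hk]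
      have h1 : ((lines.length - 1 : Nat) : Int) + 1 = ((lines.length : Nat) : Int) := by
        omega
      rw [h1, PySem.List.slice_natCast]
      rw [List.take_of_length_le (by simp)]
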